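-- pv_equiv track=rewrite | github.com/carlosuilian-bit/Painel_Gestao_MonitoracaoMPE | streamlit_app.py | validate_urls
-- ===== SOURCE A (Python) =====
-- def validate_urls(urls_by_slot: dict[str, str]) -> str | None:
--     primary_url = urls_by_slot.get("primary", "")
--     if not primary_url:
--         return "Informe o Link Principal antes de validar a analise."
--
--     filled_urls = [url for url in urls_by_slot.values() if url]
--     if len(set(filled_urls)) != len(filled_urls):
--         return "Os links nao podem ser repetidos entre as fontes da mesma analise."
--
--     return None
-- ===== SOURCE B (Python) =====
-- def validate_urls(urls_by_slot: dict[str, str]) -> str | None: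
--     if not urls_by_slot.get("primary", ""):
--         return "Informe o Link Principal antes de validar a analise."
--
--     filled_urls = [url for url in urls_by_slot.values() if url]
--     s = sorted(filled_urls)
--     for i in range(1, len(s)):
--         if s[i] == s[i - 1]:
--             return "Os links nao podem ser repetidos entre as fontes da mesma analise."
--     return None
-- ===== Notes on version B (the rewrite author's own statement) =====
-- stated objective: alternative
-- what changed: Duplicate detection among the filled URLs is done by sorting a copy and scanning adjacent pairs instead of comparing the length of a hash set with the list length.
import Mathlib
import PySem

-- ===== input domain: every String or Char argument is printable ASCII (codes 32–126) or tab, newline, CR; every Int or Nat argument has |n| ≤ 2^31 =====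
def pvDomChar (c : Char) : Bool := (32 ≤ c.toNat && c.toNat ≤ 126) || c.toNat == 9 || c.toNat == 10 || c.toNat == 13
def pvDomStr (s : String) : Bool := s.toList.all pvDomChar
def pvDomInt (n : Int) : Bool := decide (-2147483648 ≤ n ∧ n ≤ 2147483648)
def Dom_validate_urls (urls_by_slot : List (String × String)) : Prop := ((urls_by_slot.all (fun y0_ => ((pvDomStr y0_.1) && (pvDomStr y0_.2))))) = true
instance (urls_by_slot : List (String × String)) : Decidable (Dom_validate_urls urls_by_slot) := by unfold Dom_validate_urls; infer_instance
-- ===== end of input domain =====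

-- B replaces A's hash-set length comparison by sorting the filled URLs and scanning adjacent pairs (alternative duplicate detection, not faster).

-- ===== PORT A =====
def validate_urls (urls_by_slot : List (String × String)) : Option String :=
  let d := PySem.Dict.mk urls_by_slot
  let primary_url := d.getD "primary" ""
  if primary_url == "" then
    some "Informe o Link Principal antes de validar a analise."
  else
    let filled_urls := d.values.filter (fun url => !(url == ""))
    if PySem.Set.len (PySem.Set.ofList filled_urls) ≠ (filled_urls.length : Int) then
      some "Os links nao podem ser repetidos entre as fontes da mesma analise."
    else none

-- ===== PORT B =====
-- transliteration of Source B's adjacent-pair scan over the sorted copy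
def hasAdjDup : List String → Bool
  | a :: b :: t => a == b || hasAdjDup (b :: t)
  | _ => false

def validate_urls_alt (urls_by_slot : List (String × String)) : Option String :=
  let d := PySem.Dict.mk urls_by_slot
  if d.getD "primary" "" == "" then
    some "Informe o Link Principal antes de validar a analise."
  else
    let filled_urls := d.values.filter (fun url => !(url == ""))
    let s := PySem.List.sorted filled_urls (fun x => x) false
    if hasAdjDup s then
      some "Os links nao podem ser repetidos entre as fontes da mesma analise."
    else none

-- ===== PRECONDITION & SPEC =====
def Spec_validate_urls (urls_by_slot : List (String × String)) (out : Option String) : Prop := out = validate_urls_alt urls_by_slot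
instance (urls_by_slot : List (String × String)) (out : Option String) : Decidable (Spec_validate_urls urls_by_slot out) := by unfold Spec_validate_urls; infer_instance

-- ===== CLAIM (what is proved, stated in full; the proofs are below) =====
def Claim_equal_validate_urls : Prop := ∀ (urls_by_slot : List (String × String)), Dom_validate_urls urls_by_slot → Spec_validate_urls urls_by_slot (validate_urls urls_by_slot)

-- ===== LEMMAS AND PROOFS =====

-- A's test: the set length differs from the list length exactly when the list has a duplicate
lemma len_ofList_ne_iff (xs : List String) :
    (PySem.Set.len (PySem.Set.ofList xs) ≠ (xs.length : Int)) ↔ ¬ xs.Nodup := by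
  constructor
  · intro h hnd
    apply h
    rw [PySem.Set.ofList_eq_self_of_nodup xs hnd]
    simp [PySem.Set.len]
  · intro hnd h
    apply hnd
    have hsub : PySem.Set.ofList xs ⊆ xs := fun y hy => (PySem.Set.mem_ofList xs y).mp hy
    have hsp := (PySem.Set.nodup_ofList xs).subperm hsub
    have hlen : xs.length ≤ (PySem.Set.ofList xs).length := by
      simp only [PySem.Set.len] at h
      omega
    exact (hsp.perm_of_length_le hlen).nodup_iff.mp (PySem.Set.nodup_ofList xs)

-- B's test: on a weakly sorted list, no adjacent equal pair exactly means no duplicate at all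
lemma hasAdjDup_eq_false_iff (l : List String) (hs : l.Pairwise (· ≤ ·)) :
    hasAdjDup l = false ↔ l.Nodup := by
  induction l with
  | nil => simp [hasAdjDup]
  | cons a t ih =>
    cases t with
    | nil => simp [hasAdjDup]
    | cons b t' =>
      rcases List.pairwise_cons.mp hs with ⟨hab, hrest⟩
      simp only [hasAdjDup, Bool.or_eq_false_iff, beq_eq_false_iff_ne]
      constructor
      · rintro ⟨hne, hscan⟩
        have hnd' : (b :: t').Nodup := (ih hrest).mp hscan
        refine List.nodup_cons.mpr ⟨?_, hnd'⟩
        intro hmem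
        have hlt : a < b := lt_of_le_of_ne (hab b (by simp)) hne
        rcases List.mem_cons.mp hmem with h | h
        · exact hne h
        · rcases List.pairwise_cons.mp hrest with ⟨hb, _⟩
          exact absurd (hlt.trans_le (hb a h)) (lt_irrefl a)
      · intro hnd
        rcases List.nodup_cons.mp hnd with ⟨hna, hnd'⟩
        exact ⟨fun h => hna (h ▸ List.mem_cons_self ..), (ih hrest).mpr hnd'⟩

-- the two duplicate tests agree on any list of strings
lemma dup_tests_agree (xs : List String) :
    (PySem.Set.len (PySem.Set.ofList xs) ≠ (xs.length : Int)) ↔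
      hasAdjDup (PySem.List.sorted xs (fun x => x) false) = true := by
  rw [len_ofList_ne_iff]
  have hperm := PySem.List.sorted_perm xs (fun x => x) false
  have hpw : (PySem.List.sorted xs (fun x => x) false).Pairwise (· ≤ ·) := by
    simpa using PySem.List.sorted_pairwise xs (fun x => x)
  rw [← hperm.nodup_iff, ← hasAdjDup_eq_false_iff _ hpw]
  cases hasAdjDup (PySem.List.sorted xs (fun x => x) false) <;> simp

-- ===== VERDICT (by name: the statement is the Claim_ definition above) =====
theorem validate_urls_spec : Claim_equal_validate_urls := by
  intro l _
  unfold Spec_validate_urls validate_urls validate_urls_alt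
  simp only []
  by_cases hp : (PySem.Dict.mk l).getD "primary" "" == ""
  · simp [hp]
  · simp only [hp, if_false, Bool.false_eq_true]
    set f := (PySem.Dict.mk l).values.filter (fun url => !(url == "")) with hf
    by_cases hd : PySem.Set.len (PySem.Set.ofList f) ≠ (f.length : Int)
    · rw [if_pos hd, if_pos ((dup_tests_agree f).mp hd)]
    · rw [if_neg hd]
      have := (dup_tests_agree f).not.mp hd
      simp only [Bool.not_eq_true] at this
      rw [this]
      simp
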